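-- pv_equiv track=rewrite | github.com/EsYoon7/RLHF-TLCR | dataset/get_token_distance.py | process_errors_idx
-- ===== SOURCE A (Python) =====
-- def process_errors_idx(extracted_errors):
--     error_dict = {'subs_in_rejected':[], 'subs_in_modified':[], 'ins_in_modified':[], 'del_in_rejected':[]}
--
--     for idx, error in enumerate(extracted_errors):
--         if error[1] == '-':
--             error_dict['ins_in_modified'].append((error[2], error[0]))
--
--         elif error[2] == '-':
--             error_dict['del_in_rejected'].append((error[1], error[0]))
--         else:
--             error_dict['subs_in_rejected'].append((error[1], error[0]))
--             error_dict['subs_in_modified'].append((error[2], error[0]))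
--
--     return error_dict
-- ===== SOURCE B (Python) =====
-- def process_errors_idx(extracted_errors):
--     return {
--         'subs_in_rejected': [(e[1], e[0]) for e in extracted_errors if e[1] != '-' and e[2] != '-'],
--         'subs_in_modified': [(e[2], e[0]) for e in extracted_errors if e[1] != '-' and e[2] != '-'],
--         'ins_in_modified':  [(e[2], e[0]) for e in extracted_errors if e[1] == '-'],
--         'del_in_rejected':  [(e[1], e[0]) for e in extracted_errors if e[1] != '-' and e[2] == '-'],
--     }
-- ===== Notes on version B (the rewrite author's own statement) =====
-- stated objective: alternative
-- what changed: Replaces the single stateful loop that mutates a dict of four lists with four independent filtered comprehensions (one scan per output list), assembled directly into the result dict.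
import Mathlib
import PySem

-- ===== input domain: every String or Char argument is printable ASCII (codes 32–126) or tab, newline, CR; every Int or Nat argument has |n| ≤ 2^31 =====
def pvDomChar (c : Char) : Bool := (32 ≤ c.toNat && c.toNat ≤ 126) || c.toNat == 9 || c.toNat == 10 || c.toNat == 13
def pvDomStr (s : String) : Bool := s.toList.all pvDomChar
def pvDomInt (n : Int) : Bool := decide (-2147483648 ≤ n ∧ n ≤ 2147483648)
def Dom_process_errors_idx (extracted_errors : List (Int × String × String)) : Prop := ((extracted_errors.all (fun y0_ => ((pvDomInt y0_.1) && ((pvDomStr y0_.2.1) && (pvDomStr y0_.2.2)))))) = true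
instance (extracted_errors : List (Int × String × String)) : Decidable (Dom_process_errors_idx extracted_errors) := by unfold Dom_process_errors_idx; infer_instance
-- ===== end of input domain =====

-- B replaces A's single stateful loop mutating a dict of four lists by four independent
-- filtered comprehensions, one per output list (objective: alternative; same cost).

-- ===== PORT A =====
-- the loop body of A: one enumerate step mutating the dict in place
def pvStepA (d : PySem.Dict String (List (String × Int))) (p : Int × (Int × String × String)) :
    PySem.Dict String (List (String × Int)) :=
  let error := p.2
  if error.2.1 == "-" then
    d.modify "ins_in_modified" [] (· ++ [(error.2.2, error.1)])
  else if error.2.2 == "-" then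
    d.modify "del_in_rejected" [] (· ++ [(error.2.1, error.1)])
  else
    (d.modify "subs_in_rejected" [] (· ++ [(error.2.1, error.1)])).modify
      "subs_in_modified" [] (· ++ [(error.2.2, error.1)])

def process_errors_idx (extracted_errors : List (Int × String × String)) : List (String × List (String × Int)) :=
  let error_dict : PySem.Dict String (List (String × Int)) :=
    PySem.Dict.ofList [("subs_in_rejected", []), ("subs_in_modified", []),
                       ("ins_in_modified", []), ("del_in_rejected", [])]
  ((PySem.List.enumerate extracted_errors).foldl pvStepA error_dict).items

-- ===== PORT B =====
def process_errors_idx_alt (extracted_errors : List (Int × String × String)) : List (String × List (String × Int)) :=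
  [ ("subs_in_rejected",
      (extracted_errors.filter (fun e => e.2.1 != "-" && e.2.2 != "-")).map (fun e => (e.2.1, e.1))),
    ("subs_in_modified",
      (extracted_errors.filter (fun e => e.2.1 != "-" && e.2.2 != "-")).map (fun e => (e.2.2, e.1))),
    ("ins_in_modified",
      (extracted_errors.filter (fun e => e.2.1 == "-")).map (fun e => (e.2.2, e.1))),
    ("del_in_rejected",
      (extracted_errors.filter (fun e => e.2.1 != "-" && e.2.2 == "-")).map (fun e => (e.2.1, e.1))) ]

-- ===== PRECONDITION & SPEC =====
def Spec_process_errors_idx (extracted_errors : List (Int × String × String)) (out : List (String × List (String × Int))) : Prop := out = process_errors_idx_alt extracted_errors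
instance (extracted_errors : List (Int × String × String)) (out : List (String × List (String × Int))) : Decidable (Spec_process_errors_idx extracted_errors out) := by unfold Spec_process_errors_idx; infer_instance

-- ===== CLAIM (what is proved, stated in full; the proofs are below) =====
def Claim_equal_process_errors_idx : Prop := ∀ (extracted_errors : List (Int × String × String)), Dom_process_errors_idx extracted_errors → Spec_process_errors_idx extracted_errors (process_errors_idx extracted_errors)

-- ===== LEMMAS AND PROOFS =====

-- invariant of A's loop: the dict always holds exactly the four filtered lists collected so far
-- ofList on the four distinct literal keys is just the literal item list
theorem pvOfList4 (a b c d : List (String × Int)) :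
    PySem.Dict.ofList [("subs_in_rejected", a), ("subs_in_modified", b),
                       ("ins_in_modified", c), ("del_in_rejected", d)] =
    (⟨[("subs_in_rejected", a), ("subs_in_modified", b),
       ("ins_in_modified", c), ("del_in_rejected", d)]⟩ : PySem.Dict String (List (String × Int))) := by
  simp [PySem.Dict.ofList, PySem.Dict.update, PySem.Dict.insert, PySem.Dict.contains,
    PySem.Dict.empty]

theorem pvFoldA_invariant (es : List (Int × (Int × String × String)))
    (a b c d : List (String × Int)) :
    (es.foldl pvStepA
      (⟨[("subs_in_rejected", a), ("subs_in_modified", b),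
         ("ins_in_modified", c), ("del_in_rejected", d)]⟩ : PySem.Dict String (List (String × Int)))).items =
    [ ("subs_in_rejected",
        a ++ (es.filter (fun e => e.2.2.1 != "-" && e.2.2.2 != "-")).map (fun e => (e.2.2.1, e.2.1))),
      ("subs_in_modified",
        b ++ (es.filter (fun e => e.2.2.1 != "-" && e.2.2.2 != "-")).map (fun e => (e.2.2.2, e.2.1))),
      ("ins_in_modified",
        c ++ (es.filter (fun e => e.2.2.1 == "-")).map (fun e => (e.2.2.2, e.2.1))),
      ("del_in_rejected",
        d ++ (es.filter (fun e => e.2.2.1 != "-" && e.2.2.2 == "-")).map (fun e => (e.2.2.1, e.2.1))) ] := by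
  induction es generalizing a b c d with
  | nil => simp
  | cons e es ih =>
    by_cases h1 : e.2.2.1 = "-"
    · simp only [List.foldl_cons, pvStepA, h1, List.filter_cons]
      have : ((⟨[("subs_in_rejected", a), ("subs_in_modified", b),
          ("ins_in_modified", c), ("del_in_rejected", d)]⟩ : PySem.Dict String (List (String × Int))).modify "ins_in_modified" []
            (· ++ [(e.2.2.2, e.2.1)])) =
          (⟨[("subs_in_rejected", a), ("subs_in_modified", b),
            ("ins_in_modified", c ++ [(e.2.2.2, e.2.1)]), ("del_in_rejected", d)]⟩ : PySem.Dict String (List (String × Int))) := by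
        simp [PySem.Dict.modify, PySem.Dict.insert, PySem.Dict.contains, PySem.Dict.get?,
          PySem.Dict.getD]
      simp [this, ih]
    · by_cases h2 : e.2.2.2 = "-"
      · simp only [List.foldl_cons, pvStepA, h2, List.filter_cons]
        have : ((⟨[("subs_in_rejected", a), ("subs_in_modified", b),
            ("ins_in_modified", c), ("del_in_rejected", d)]⟩ : PySem.Dict String (List (String × Int))).modify "del_in_rejected" []
              (· ++ [(e.2.2.1, e.2.1)])) =
            (⟨[("subs_in_rejected", a), ("subs_in_modified", b),
              ("ins_in_modified", c), ("del_in_rejected", d ++ [(e.2.2.1, e.2.1)])]⟩ : PySem.Dict String (List (String × Int))) := by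
          simp [PySem.Dict.modify, PySem.Dict.insert, PySem.Dict.contains, PySem.Dict.get?,
            PySem.Dict.getD]
        simp [this, ih, h1]
      · simp only [List.foldl_cons, pvStepA, List.filter_cons]
        have : (((⟨[("subs_in_rejected", a), ("subs_in_modified", b),
            ("ins_in_modified", c), ("del_in_rejected", d)]⟩ : PySem.Dict String (List (String × Int))).modify "subs_in_rejected" []
              (· ++ [(e.2.2.1, e.2.1)])).modify "subs_in_modified" [] (· ++ [(e.2.2.2, e.2.1)])) =
            (⟨[("subs_in_rejected", a ++ [(e.2.2.1, e.2.1)]),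
              ("subs_in_modified", b ++ [(e.2.2.2, e.2.1)]),
              ("ins_in_modified", c), ("del_in_rejected", d)]⟩ : PySem.Dict String (List (String × Int))) := by
          simp [PySem.Dict.modify, PySem.Dict.insert, PySem.Dict.contains, PySem.Dict.get?,
            PySem.Dict.getD]
        simp [this, ih, h1, h2]

-- enumerate keeps each element as the second component, so the filters/maps over the
-- enumerated list are the filters/maps of B over the plain list
theorem pvEnum_filter_map_from (xs : List (Int × String × String)) (s : Int)
    (p : (Int × String × String) → Bool) (g : (Int × String × String) → (String × Int)) :
    ((PySem.List.enumerate xs s).filter (fun e => p e.2)).map (fun e => g e.2) =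
    (xs.filter p).map g := by
  induction xs generalizing s with
  | nil => rfl
  | cons x xs ih =>
    simp only [PySem.List.enumerate_cons, List.filter_cons]
    by_cases hp : p x <;> simp [hp, ih]

theorem pvEnum_filter_map (xs : List (Int × String × String))
    (p : (Int × String × String) → Bool) (g : (Int × String × String) → (String × Int)) :
    ((PySem.List.enumerate xs).filter (fun e => p e.2)).map (fun e => g e.2) =
    (xs.filter p).map g :=
  pvEnum_filter_map_from xs 0 p g

-- the four projections of the invariant, phrased over the plain list
theorem pvEnumSubsRej (xs : List (Int × String × String)) :
    List.map (fun e => (e.2.2.1, e.2.1))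
      (List.filter (fun e => e.2.2.1 != "-" && e.2.2.2 != "-") (PySem.List.enumerate xs)) =
    List.map (fun e => (e.2.1, e.1)) (List.filter (fun e => e.2.1 != "-" && e.2.2 != "-") xs) :=
  pvEnum_filter_map xs (fun el => el.2.1 != "-" && el.2.2 != "-") (fun el => (el.2.1, el.1))

theorem pvEnumSubsMod (xs : List (Int × String × String)) :
    List.map (fun e => (e.2.2.2, e.2.1))
      (List.filter (fun e => e.2.2.1 != "-" && e.2.2.2 != "-") (PySem.List.enumerate xs)) =
    List.map (fun e => (e.2.2, e.1)) (List.filter (fun e => e.2.1 != "-" && e.2.2 != "-") xs) :=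
  pvEnum_filter_map xs (fun el => el.2.1 != "-" && el.2.2 != "-") (fun el => (el.2.2, el.1))

theorem pvEnumIns (xs : List (Int × String × String)) :
    List.map (fun e => (e.2.2.2, e.2.1))
      (List.filter (fun e => e.2.2.1 == "-") (PySem.List.enumerate xs)) =
    List.map (fun e => (e.2.2, e.1)) (List.filter (fun e => e.2.1 == "-") xs) :=
  pvEnum_filter_map xs (fun el => el.2.1 == "-") (fun el => (el.2.2, el.1))

theorem pvEnumDel (xs : List (Int × String × String)) :
    List.map (fun e => (e.2.2.1, e.2.1))
      (List.filter (fun e => e.2.2.1 != "-" && e.2.2.2 == "-") (PySem.List.enumerate xs)) =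
    List.map (fun e => (e.2.1, e.1)) (List.filter (fun e => e.2.1 != "-" && e.2.2 == "-") xs) :=
  pvEnum_filter_map xs (fun el => el.2.1 != "-" && el.2.2 == "-") (fun el => (el.2.1, el.1))

theorem process_errors_idx_eq (xs : List (Int × String × String)) :
    process_errors_idx xs = process_errors_idx_alt xs := by
  unfold process_errors_idx process_errors_idx_alt
  rw [pvOfList4, pvFoldA_invariant, pvEnumSubsRej xs, pvEnumSubsMod xs, pvEnumIns xs,
    pvEnumDel xs]
  simp only [List.nil_append]

-- ===== VERDICT (by name: the statement is the Claim_ definition above) =====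
theorem process_errors_idx_spec : Claim_equal_process_errors_idx := by
  intro xs _
  unfold Spec_process_errors_idx
  exact process_errors_idx_eq xs
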